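-- pv_equiv track=rewrite | github.com/aali-1/CCC-stuff | COCI/COCI '07 Contest 4 #2 Veci.py | check
-- ===== SOURCE A (Python) =====
-- def check(a,b):
--     a=[int(x) for x in str(a)]
--     b=[int(x) for x in str(b)]
--     if len(a)!=len(b):
--         return False
--     a.sort()
--     b.sort()
--     if a!=b:
--         return False
--     else:
--         return True
-- ===== SOURCE B (Python) =====
-- def check(a, b):
--     def tally(n):
--         counts = [0] * 10
--         for x in str(n):
--             counts[int(x)] += 1
--         return counts
--     return tally(a) == tally(b)
-- ===== Notes on version B (the rewrite author's own statement) =====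
-- stated objective: simpler
-- what changed: B replaces the length check plus sorting of both digit lists by a single digit-frequency tally (a 10-slot count array per number) compared for equality.
import Mathlib
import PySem

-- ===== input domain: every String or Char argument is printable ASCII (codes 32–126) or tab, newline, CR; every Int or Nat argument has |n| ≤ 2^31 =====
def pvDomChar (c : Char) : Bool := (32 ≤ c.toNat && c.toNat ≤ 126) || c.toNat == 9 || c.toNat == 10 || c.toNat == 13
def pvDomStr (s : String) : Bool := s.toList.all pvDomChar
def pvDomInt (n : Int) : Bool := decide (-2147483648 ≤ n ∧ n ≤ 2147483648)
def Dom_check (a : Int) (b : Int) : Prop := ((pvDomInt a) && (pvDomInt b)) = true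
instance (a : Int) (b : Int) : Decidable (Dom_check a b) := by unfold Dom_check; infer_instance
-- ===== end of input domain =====

-- B replaces A's length check plus sorting of both digit lists by a digit-frequency tally
-- (a 10-slot count list per number) compared for equality; simpler, same results.

-- ===== PORT A =====
-- int(x) for a one-character string x is PySem.Int.ofChars? [x]; on Pre_check (both numbers
-- nonnegative) every character of str(n) is a digit, so the .getD 0 default is never reached
-- (outside Pre_check Python raises ValueError on '-', and those inputs are excluded).
def pvDigitVal (c : Char) : Int := (PySem.Int.ofChars? [c]).getD 0

def check (a : Int) (b : Int) : Bool :=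
  let la := (PySem.Int.toStr a).toList.map pvDigitVal
  let lb := (PySem.Int.toStr b).toList.map pvDigitVal
  if la.length ≠ lb.length then false
  else if PySem.List.sorted la (fun x => x) false ≠ PySem.List.sorted lb (fun x => x) false then false
  else true

-- ===== PORT B =====
-- counts[int(x)] += 1 : on Pre_check the index int(x) is a digit 0..9, so .toNat/List.set/getD
-- is exact there (Python never sees a negative or out-of-range index inside Pre_check).
def pvTally (n : Int) : List Int :=
  (PySem.Int.toStr n).toList.foldl
    (fun counts x => counts.set (pvDigitVal x).toNat (counts.getD (pvDigitVal x).toNat 0 + 1))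
    (List.replicate 10 0)

def check_alt (a : Int) (b : Int) : Bool := pvTally a == pvTally b

-- ===== PRECONDITION & SPEC =====
-- Pre_ excludes negative inputs: on them str(n) starts with '-' and int('-') raises ValueError
-- in A (and in B alike), so A returns no value there.
def Pre_check (a : Int) (b : Int) : Prop := 0 ≤ a ∧ 0 ≤ b
instance (a : Int) (b : Int) : Decidable (Pre_check a b) := by unfold Pre_check; infer_instance
def pvWitness_check : Int × Int := (112, 211)

def Spec_check (a : Int) (b : Int) (out : Bool) : Prop := out = check_alt a b
instance (a : Int) (b : Int) (out : Bool) : Decidable (Spec_check a b out) := by unfold Spec_check; infer_instance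

-- ===== CLAIM (what is proved, stated in full; the proofs are below) =====
def Claim_equal_check : Prop := ∀ (a : Int) (b : Int), Dom_check a b → Pre_check a b → Spec_check a b (check a b)

-- ===== LEMMAS AND PROOFS =====

-- the fold step of pvTally, on the already-converted digit value
def pvStep (cs : List Int) (v : Int) : List Int := cs.set v.toNat (cs.getD v.toNat 0 + 1)

theorem pvTally_eq_foldl_map (n : Int) :
    pvTally n = ((PySem.Int.toStr n).toList.map pvDigitVal).foldl pvStep (List.replicate 10 0) := by
  simp [pvTally, List.foldl_map, pvStep]

theorem toDigitsCore_chars :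
    ∀ (f n : Nat) (l : List Char) (c : Char), c ∈ Nat.toDigitsCore 10 f n l →
      c ∈ l ∨ ∃ m, m < 10 ∧ c = Nat.digitChar m := by
  intro f
  induction f with
  | zero => intro n l c h; exact Or.inl h
  | succ f ih =>
    intro n l c h
    simp only [Nat.toDigitsCore] at h
    split at h
    case isTrue =>
      rcases List.mem_cons.mp h with h | h
      · exact Or.inr ⟨n % 10, Nat.mod_lt _ (by norm_num), h⟩
      · exact Or.inl h
    case isFalse =>
      rcases ih _ _ _ h with h' | h'
      · rcases List.mem_cons.mp h' with h' | h'
        · exact Or.inr ⟨n % 10, Nat.mod_lt _ (by norm_num), h'⟩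
        · exact Or.inl h'
      · exact Or.inr h'

theorem pvDigitVal_digitChar : ∀ m : Nat, m < 10 → pvDigitVal (Nat.digitChar m) = (m : Int) := by
  decide

theorem digits_range (n : Int) (hn : 0 ≤ n) :
    ∀ x ∈ (PySem.Int.toStr n).toList.map pvDigitVal, 0 ≤ x ∧ x < 10 := by
  intro x hx
  rw [PySem.Int.toList_toStr] at hx
  rcases List.mem_map.mp hx with ⟨c, hc, rfl⟩
  have : c ∈ Nat.toDigits 10 n.toNat := by
    simpa [PySem.Int.toChars, not_lt.mpr hn] using hc
  rcases toDigitsCore_chars _ _ _ _ this with h | ⟨m, hm, rfl⟩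
  · simp at h
  · rw [pvDigitVal_digitChar m hm]
    constructor <;> [positivity; exact_mod_cast hm]

theorem foldl_pvStep_length : ∀ (l : List Int) (cs : List Int),
    (l.foldl pvStep cs).length = cs.length := by
  intro l
  induction l with
  | nil => intro cs; rfl
  | cons x l ih => intro cs; rw [List.foldl_cons, ih]; simp [pvStep]

theorem foldl_pvStep_getD : ∀ (l : List Int) (cs : List Int),
    (∀ x ∈ l, 0 ≤ x ∧ x < 10) → cs.length = 10 → ∀ i : Nat, i < 10 →
      (l.foldl pvStep cs).getD i 0 = cs.getD i 0 + l.count (i : Int) := by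
  intro l
  induction l with
  | nil => intro cs _ _ i _; simp
  | cons x l ih =>
    intro cs hr hlen i hi
    obtain ⟨hx0, hx10⟩ := hr x (List.mem_cons_self ..)
    rw [List.foldl_cons,
      ih (pvStep cs x) (fun y hy => hr y (List.mem_cons_of_mem _ hy)) (by simp [pvStep, hlen]) i hi]
    have hset : (pvStep cs x).getD i 0 = cs.getD i 0 + if x.toNat = i then 1 else 0 := by
      simp only [pvStep, List.getD_eq_getElem?_getD, List.getElem?_set, hlen]
      by_cases h : x.toNat = i
      · simp [h, hi]
      · simp [h]
    rw [hset, List.count_cons]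
    have : (x == (i : Int)) = decide (x.toNat = i) := by
      by_cases h : x.toNat = i <;> simp [h] <;> omega
    rw [this]
    by_cases h : x.toNat = i <;> simp [h] <;> ring

theorem tallyList_eq_iff_count (la lb : List Int)
    (ha : ∀ x ∈ la, 0 ≤ x ∧ x < 10) (hb : ∀ x ∈ lb, 0 ≤ x ∧ x < 10) :
    la.foldl pvStep (List.replicate 10 0) = lb.foldl pvStep (List.replicate 10 0) ↔
      ∀ v : Int, la.count v = lb.count v := by
  constructor
  · intro h v
    by_cases hv : 0 ≤ v ∧ v < 10
    · have hvn : v.toNat < 10 := by omega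
      have h1 := foldl_pvStep_getD la (List.replicate 10 0) ha (by simp) v.toNat hvn
      have h2 := foldl_pvStep_getD lb (List.replicate 10 0) hb (by simp) v.toNat hvn
      rw [h] at h1
      have hcast : ((v.toNat : Nat) : Int) = v := by omega
      rw [hcast] at h1 h2
      omega
    · rw [List.count_eq_zero.mpr (fun hm => hv ⟨(ha v hm).1, (ha v hm).2⟩),
        List.count_eq_zero.mpr (fun hm => hv ⟨(hb v hm).1, (hb v hm).2⟩)]
  · intro h
    have hla : (la.foldl pvStep (List.replicate 10 0)).length = 10 := by
      rw [foldl_pvStep_length]; simp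
    have hlb : (lb.foldl pvStep (List.replicate 10 0)).length = 10 := by
      rw [foldl_pvStep_length]; simp
    apply List.ext_getElem (by omega)
    intro i hi _
    have h1 := foldl_pvStep_getD la (List.replicate 10 0) ha (by simp) i (by omega)
    have h2 := foldl_pvStep_getD lb (List.replicate 10 0) hb (by simp) i (by omega)
    have e1 : (la.foldl pvStep (List.replicate 10 0))[i] =
        (la.foldl pvStep (List.replicate 10 0)).getD i 0 := by
      rw [List.getD_eq_getElem?_getD, List.getElem?_eq_getElem hi]; rfl
    have e2 : (lb.foldl pvStep (List.replicate 10 0))[i]'(by omega) =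
        (lb.foldl pvStep (List.replicate 10 0)).getD i 0 := by
      rw [List.getD_eq_getElem?_getD, List.getElem?_eq_getElem (by omega)]; rfl
    rw [e1, e2, h1, h2, h]

theorem check_eq_check_alt (a b : Int) (ha : 0 ≤ a) (hb : 0 ≤ b) :
    check a b = check_alt a b := by
  have ra := digits_range a ha
  have rb := digits_range b hb
  set la := (PySem.Int.toStr a).toList.map pvDigitVal with hla
  set lb := (PySem.Int.toStr b).toList.map pvDigitVal with hlb
  have keyB : (pvTally a = pvTally b) ↔ la.Perm lb := by
    rw [pvTally_eq_foldl_map, pvTally_eq_foldl_map, ← hla, ← hlb,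
      tallyList_eq_iff_count la lb ra rb]
    exact (List.perm_iff_count).symm
  have keyA : ((PySem.List.sorted la (fun x => x) false) =
      PySem.List.sorted lb (fun x => x) false) ↔ la.Perm lb :=
    PySem.List.sorted_id_eq_sorted_id_iff_perm la lb
  by_cases hp : la.Perm lb
  · have hlen : la.length = lb.length := hp.length_eq
    simp only [check, check_alt, ← hla, ← hlb]
    rw [if_neg (by simp [hlen]), if_neg (by simp [keyA.mpr hp])]
    exact ((beq_iff_eq ..).mpr (keyB.mpr hp)).symm
  · have hB : check_alt a b = false := by
      simp only [check_alt, beq_eq_false_iff_ne, ne_eq]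
      exact fun h => hp (keyB.mp h)
    rw [hB]
    simp only [check, ← hla, ← hlb]
    by_cases hlen : la.length = lb.length
    · rw [if_neg (by simp [hlen]), if_pos (by simp; exact fun h => hp (keyA.mp h))]
    · rw [if_pos hlen]

-- ===== VERDICT (by name: the statement is the Claim_ definition above) =====
theorem check_spec : Claim_equal_check := by
  intro a b _ hpre
  unfold Spec_check
  exact check_eq_check_alt a b hpre.1 hpre.2
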